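-- pv_equiv track=rewrite | github.com/FallThunder/AOC-2023 | day7/Utilities.py | check_if_two_pair
-- ===== SOURCE A (Python) =====
-- def check_if_two_pair(hand):
--     """
--     Check if the hand is a two pair.
--
--     Parameters:
--     - hand (str): The hand.
--
--     Returns:
--     - bool: True if the hand is a two pair, False otherwise.
--     """
--
--     first_pair = ""
--     # Check if the hand is a two pair
--     for card in hand:
--         if hand.count(card) == 2:
--             first_pair = card
--             for card in hand:
--                 if hand.count(card) == 2 and not card == first_pair:
--                     return True
--
--     return False
-- ===== SOURCE B (Python) =====
-- def check_if_two_pair(hand):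
--     counts = {}
--     for card in hand:
--         counts[card] = counts.get(card, 0) + 1
--     pairs = sum(1 for v in counts.values() if v == 2)
--     return pairs >= 2
-- ===== Notes on version B (the rewrite author's own statement) =====
-- stated objective: faster
-- what changed: Replaces A's nested rescanning loops (hand.count inside two loops over the hand) with a single-pass frequency dictionary whose values are then counted for exact pairs.
import Mathlib
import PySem

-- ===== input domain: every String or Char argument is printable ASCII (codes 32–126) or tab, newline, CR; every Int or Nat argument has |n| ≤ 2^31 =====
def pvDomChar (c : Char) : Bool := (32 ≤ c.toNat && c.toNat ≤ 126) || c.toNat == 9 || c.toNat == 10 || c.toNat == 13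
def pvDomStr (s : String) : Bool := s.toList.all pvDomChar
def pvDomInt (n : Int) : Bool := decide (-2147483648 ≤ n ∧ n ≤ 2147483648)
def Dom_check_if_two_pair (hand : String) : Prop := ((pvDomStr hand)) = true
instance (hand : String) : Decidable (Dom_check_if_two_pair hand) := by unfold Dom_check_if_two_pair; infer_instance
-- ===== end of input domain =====

-- B replaces A's nested rescanning loops by a one-pass frequency dictionary whose
-- values are then counted for exact pairs (objective: faster).

-- ===== PORT A =====
-- inner 'for card in hand: if hand.count(card) == 2 and not card == first_pair: return True'
def pvAInner (full : List Char) (fp : Char) : List Char → Bool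
  | [] => false
  | c :: rest =>
    if full.count c = 2 ∧ ¬ c = fp then true else pvAInner full fp rest

-- outer 'for card in hand: if hand.count(card) == 2: first_pair = card; <inner>'
def pvAOuter (full : List Char) : List Char → Bool
  | [] => false
  | c :: rest =>
    if full.count c = 2 then
      (if pvAInner full c full then true else pvAOuter full rest)
    else pvAOuter full rest

def check_if_two_pair (hand : String) : Bool :=
  pvAOuter hand.toList hand.toList

-- ===== PORT B =====
def check_if_two_pair_alt (hand : String) : Bool :=
  -- counts = {}; for card in hand: counts[card] = counts.get(card, 0) + 1
  let counts : PySem.Dict Char Int :=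
    hand.toList.foldl (fun d c => d.modify c 0 (· + 1)) PySem.Dict.empty
  -- pairs = sum(1 for v in counts.values() if v == 2); return pairs >= 2
  decide (2 ≤ (counts.values.filter (fun v => v == (2 : Int))).length)

-- ===== PRECONDITION & SPEC =====
def Spec_check_if_two_pair (hand : String) (out : Bool) : Prop := out = check_if_two_pair_alt hand
instance (hand : String) (out : Bool) : Decidable (Spec_check_if_two_pair hand out) := by unfold Spec_check_if_two_pair; infer_instance

-- ===== CLAIM (what is proved, stated in full; the proofs are below) =====
def Claim_equal_check_if_two_pair : Prop := ∀ (hand : String), Dom_check_if_two_pair hand → Spec_check_if_two_pair hand (check_if_two_pair hand)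

-- ===== LEMMAS AND PROOFS =====

lemma pvAInner_eq_any (full : List Char) (fp : Char) (l : List Char) :
    pvAInner full fp l = l.any (fun c => decide (full.count c = 2) && decide (¬ c = fp)) := by
  induction l with
  | nil => rfl
  | cons c rest ih =>
    simp only [pvAInner, List.any_cons, ih]
    by_cases h : full.count c = 2 ∧ ¬ c = fp
    · simp [h.1, h.2]
    · rw [if_neg h]
      rcases Decidable.not_and_iff_or_not.mp h with h1 | h1 <;> simp [h1]

lemma pvAOuter_eq_any (full : List Char) (l : List Char) :
    pvAOuter full l = l.any (fun c => decide (full.count c = 2) && pvAInner full c full) := by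
  induction l with
  | nil => rfl
  | cons c rest ih =>
    simp only [pvAOuter, List.any_cons, ih]
    by_cases h : full.count c = 2
    · by_cases h2 : pvAInner full c full <;> simp [h, h2]
    · simp [h]

-- A is true iff there are two DISTINCT cards, each with count exactly 2
lemma portA_iff (l : List Char) :
    pvAOuter l l = true ↔ ∃ c ∈ l, l.count c = 2 ∧ ∃ c' ∈ l, l.count c' = 2 ∧ ¬ c' = c := by
  rw [pvAOuter_eq_any]
  simp only [List.any_eq_true, Bool.and_eq_true, decide_eq_true_eq, pvAInner_eq_any]

-- the filtered dedup list underlying B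
def pvPairs (l : List Char) : List Char :=
  (PySem.List.dedup l).filter (fun k => decide ((l.count k : Int) = 2))

lemma pvPairs_nodup (l : List Char) : (pvPairs l).Nodup :=
  (PySem.List.nodup_dedup l).filter _

lemma mem_pvPairs (l : List Char) (c : Char) :
    c ∈ pvPairs l ↔ c ∈ l ∧ l.count c = 2 := by
  simp only [pvPairs, List.mem_filter, PySem.List.mem_dedup, decide_eq_true_eq]
  constructor
  · rintro ⟨h1, h2⟩; exact ⟨h1, by exact_mod_cast h2⟩
  · rintro ⟨h1, h2⟩; exact ⟨h1, by exact_mod_cast h2⟩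

-- B is true iff the same condition holds
lemma portB_iff (l : List Char) :
    (2 ≤ (pvPairs l).length) ↔ ∃ c ∈ l, l.count c = 2 ∧ ∃ c' ∈ l, l.count c' = 2 ∧ ¬ c' = c := by
  constructor
  · intro h
    match hp : pvPairs l with
    | [] => rw [hp] at h; simp at h
    | [a] => rw [hp] at h; simp at h
    | a :: b :: t =>
      have hnd := pvPairs_nodup l
      rw [hp] at hnd
      have hab : ¬ b = a := fun e => (by simp [e] at hnd)
      have ha : a ∈ pvPairs l := by rw [hp]; simp
      have hb : b ∈ pvPairs l := by rw [hp]; simp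
      rw [mem_pvPairs] at ha hb
      exact ⟨a, ha.1, ha.2, b, hb.1, hb.2, hab⟩
  · rintro ⟨c, hc, h2, c', hc', h2', hne⟩
    have hcP : c ∈ pvPairs l := (mem_pvPairs l c).mpr ⟨hc, h2⟩
    have hc'P : c' ∈ pvPairs l := (mem_pvPairs l c').mpr ⟨hc', h2'⟩
    have hsub : ({c, c'} : Finset Char) ⊆ (pvPairs l).toFinset := by
      intro x hx
      simp only [Finset.mem_insert, Finset.mem_singleton] at hx
      rcases hx with rfl | rfl <;> simpa using (by assumption : x ∈ pvPairs l)
    have hcard : ({c, c'} : Finset Char).card = 2 := by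
      rw [Finset.card_insert_of_notMem (by simpa using fun e => hne e.symm)]
      simp
    calc 2 = ({c, c'} : Finset Char).card := hcard.symm
      _ ≤ (pvPairs l).toFinset.card := Finset.card_le_card hsub
      _ = (pvPairs l).length := List.toFinset_card_of_nodup (pvPairs_nodup l)

-- B's dictionary values, filtered for 2, are exactly pvPairs (up to the map)
lemma portB_unfold (hand : String) :
    check_if_two_pair_alt hand = decide (2 ≤ (pvPairs hand.toList).length) := by
  unfold check_if_two_pair_alt
  simp only []
  have hc : hand.toList.foldl (fun d c => d.modify c 0 (· + 1)) PySem.Dict.empty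
      = PySem.Dict.counter hand.toList := (PySem.Dict.counter_eq_foldl hand.toList).symm
  rw [hc]
  have hv : (PySem.Dict.counter hand.toList).values
      = (PySem.Dict.counter hand.toList).keys.map
          (fun k => (PySem.Dict.counter hand.toList).getD k 0) :=
    PySem.Dict.values_eq_map_keys _ (PySem.Dict.nodup_keys_counter _) 0
  rw [hv]
  simp only [PySem.Dict.keys_counter, PySem.Dict.getD_counter, List.filter_map,
    List.length_map, ← PySem.List.dedup_eq_ofList, pvPairs]
  congr 2

-- ===== VERDICT (by name: the statement is the Claim_ definition above) =====
theorem check_if_two_pair_spec : Claim_equal_check_if_two_pair := by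
  intro hand _
  unfold Spec_check_if_two_pair
  rw [portB_unfold]
  unfold check_if_two_pair
  rw [Bool.eq_iff_iff]
  simp only [decide_eq_true_eq]
  exact (portA_iff hand.toList).trans (portB_iff hand.toList).symm
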